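-- pv_equiv track=rewrite | github.com/jednipit-golf/Comprog | Grader/09_Nestedloop/09_Fill_In_Numbers.py | pattern2
-- ===== SOURCE A (Python) =====
-- def pattern2(nrows, ncols):
--     c = []
--     a = nrows * ncols
--     n = []
--     for i in range(1,nrows+1):
--         for j in range(i,a+1,nrows):
--             n.append(j)
--         c.append(n)
--         n = []
--     return c
-- ===== SOURCE B (Python) =====
-- def pattern2(nrows, ncols):
--     # No rows: nothing to build.
--     if nrows <= 0:
--         return []
--     # No columns: nrows empty rows.
--     if ncols <= 0:
--         return [[] for _ in range(nrows)]
--     # Build the columns (each is one consecutive run of numbers), then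
--     # transpose them into rows.
--     cols = [range(c * nrows + 1, (c + 1) * nrows + 1) for c in range(ncols)]
--     return [list(row) for row in zip(*cols)]
-- ===== Notes on version B (the rewrite author's own statement) =====
-- stated objective: alternative
-- what changed: B builds the matrix column-first (each column is one consecutive run range(c*nrows+1,(c+1)*nrows+1)) and transposes the columns into rows with zip(*cols), instead of A's row-by-row appending of stepped inner ranges.
import Mathlib
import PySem

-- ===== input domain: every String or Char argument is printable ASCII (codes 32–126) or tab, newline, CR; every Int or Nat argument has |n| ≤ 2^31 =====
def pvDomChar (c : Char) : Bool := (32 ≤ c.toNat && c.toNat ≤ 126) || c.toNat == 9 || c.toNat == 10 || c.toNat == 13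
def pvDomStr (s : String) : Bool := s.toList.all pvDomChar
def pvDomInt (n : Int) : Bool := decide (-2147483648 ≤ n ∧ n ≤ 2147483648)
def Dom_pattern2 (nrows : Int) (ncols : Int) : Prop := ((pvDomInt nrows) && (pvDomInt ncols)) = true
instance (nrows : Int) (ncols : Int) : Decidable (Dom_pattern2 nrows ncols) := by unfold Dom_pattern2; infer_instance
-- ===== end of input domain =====

-- B builds the columns of the matrix (each column is one consecutive run of numbers)
-- and transposes them into rows, instead of A's row-by-row append of stepped ranges;
-- objective: alternative decomposition.

-- ===== PORT A =====
def pattern2 (nrows : Int) (ncols : Int) : List (List Int) :=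
  let c : List (List Int) := []
  let a : Int := nrows * ncols
  let n : List Int := []
  let st :=
    (PySem.List.pyRange 1 (nrows + 1) 1).foldl
      (fun (st : List (List Int) × List Int) i =>
        let n := (PySem.List.pyRange i (a + 1) nrows).foldl (fun n j => n ++ [j]) st.2
        let c := st.1 ++ [n]
        (c, ([] : List Int)))
      (c, n)
  st.1

-- ===== PORT B =====
-- zip(*cols): rows of simultaneous heads while every column (here: every list)
-- is nonempty and there is at least one column; zip() with no argument yields nothing.
-- (list(row) on each produced tuple is the identity under the List typing.)
def pyZipStar (cols : List (List Int)) : List (List Int) :=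
  if h : cols.all (fun c => !c.isEmpty) = true ∧ cols ≠ [] then
    cols.map (fun c => c.headD 0) :: pyZipStar (cols.map List.tail)
  else []
termination_by (cols.headD []).length
decreasing_by
  obtain ⟨hall, hne⟩ := h
  match cols with
  | c0 :: rest =>
    have h0 : !c0.isEmpty = true := by
      have := List.all_eq_true.mp hall c0 (List.mem_cons_self)
      simpa using this
    cases c0 with
    | nil => simp at h0
    | cons x xs => simp

def pattern2_alt (nrows : Int) (ncols : Int) : List (List Int) :=
  if nrows ≤ 0 then [] else
  if ncols ≤ 0 then (PySem.List.pyRange 0 nrows 1).map (fun _ => ([] : List Int)) else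
  let cols :=
    (PySem.List.pyRange 0 ncols 1).map
      (fun c => PySem.List.pyRange (c * nrows + 1) ((c + 1) * nrows + 1) 1)
  pyZipStar cols

-- ===== PRECONDITION & SPEC =====
def Spec_pattern2 (nrows : Int) (ncols : Int) (out : List (List Int)) : Prop := out = pattern2_alt nrows ncols
instance (nrows : Int) (ncols : Int) (out : List (List Int)) : Decidable (Spec_pattern2 nrows ncols out) := by unfold Spec_pattern2; infer_instance

-- ===== CLAIM (what is proved, stated in full; the proofs are below) =====
def Claim_equal_pattern2 : Prop := ∀ (nrows : Int) (ncols : Int), Dom_pattern2 nrows ncols → Spec_pattern2 nrows ncols (pattern2 nrows ncols)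

-- ===== LEMMAS AND PROOFS =====

-- n.append(j) over a whole list is just appending the list
theorem foldl_append_singleton (l : List Int) (init : List Int) :
    l.foldl (fun n j => n ++ [j]) init = init ++ l := by
  induction l generalizing init with
  | nil => simp
  | cons x xs ih => simp [List.foldl_cons, ih]

-- A's outer loop: the accumulated c is the map of the inner rows
theorem pattern2_foldl_eq_map (a s : Int) (l : List Int) (acc : List (List Int)) :
    (l.foldl
      (fun (st : List (List Int) × List Int) i =>
        (st.1 ++ [(PySem.List.pyRange i (a + 1) s).foldl (fun n j => n ++ [j]) st.2],
          ([] : List Int)))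
      (acc, ([] : List Int))).1
    = acc ++ l.map (fun i => PySem.List.pyRange i (a + 1) s) := by
  induction l generalizing acc with
  | nil => simp
  | cons x xs ih =>
    simp only [List.foldl_cons, List.map_cons]
    rw [foldl_append_singleton, ih]
    simp

theorem pattern2_eq_map (nrows ncols : Int) :
    pattern2 nrows ncols
      = (PySem.List.pyRange 1 (nrows + 1) 1).map
          (fun i => PySem.List.pyRange i (nrows * ncols + 1) nrows) := by
  unfold pattern2
  exact pattern2_foldl_eq_map (nrows * ncols) nrows _ []

-- A's inner stepped range, characterised as a map over range ncols
theorem rowA_eq (nrows ncols i : Int) (h1 : 1 ≤ i) (h2 : i ≤ nrows) :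
    PySem.List.pyRange i (nrows * ncols + 1) nrows
      = List.map (fun k : Nat => i + nrows * (k : Int)) (List.range ncols.toNat) := by
  have hpos : 0 < nrows := lt_of_lt_of_le h1 h2
  have hN : (if i < nrows * ncols + 1
      then ((nrows * ncols + 1 - i + nrows - 1) / nrows).toNat else 0) = ncols.toNat := by
    by_cases hc : 0 < ncols
    · have hlt : i < nrows * ncols + 1 := by nlinarith
      rw [if_pos hlt]
      have heq : nrows * ncols + 1 - i + nrows - 1 = (nrows - i) + ncols * nrows := by ring
      rw [heq, Int.add_mul_ediv_right _ _ (ne_of_gt hpos),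
          Int.ediv_eq_zero_of_lt (by omega) (by omega)]
      omega
    · have hle : nrows * ncols ≤ 0 := by nlinarith
      rw [if_neg (by omega)]
      omega
  rw [PySem.List.pyRange_of_pos _ _ hpos, hN]

-- zip(*cols) on equal-length nonempty column lists is the row-indexed transpose
theorem pyZipStar_eq (n : Nat) : ∀ (cols : List (List Int)), cols ≠ [] →
    (∀ c ∈ cols, c.length = n) →
    pyZipStar cols = (List.range n).map (fun r => cols.map (fun c => c.getD r 0)) := by
  induction n with
  | zero =>
    intro cols hne hlen
    rw [pyZipStar]
    rw [dif_neg]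
    · simp
    · intro ⟨hall, _⟩
      obtain ⟨c0, rest, rfl⟩ := List.exists_cons_of_ne_nil hne
      have h0 := List.all_eq_true.mp hall c0 (List.mem_cons_self)
      have : c0.length = 0 := hlen c0 (List.mem_cons_self)
      cases c0 with
      | nil => simp at h0
      | cons x xs => simp at this
  | succ n ih =>
    intro cols hne hlen
    rw [pyZipStar]
    rw [dif_pos]
    · rw [ih (cols.map List.tail) (by simpa using hne)
        (by
          intro c hc
          obtain ⟨d, hd, rfl⟩ := List.mem_map.mp hc
          have := hlen d hd
          cases d with
          | nil => simp at this
          | cons x xs => simpa using this)]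
      rw [List.range_succ_eq_map]
      simp only [List.map_cons, List.map_map]
      congr 1
      · apply List.map_congr_left
        intro c hc
        have := hlen c hc
        cases c with
        | nil => simp at this
        | cons x xs => simp
      · apply List.map_congr_left
        intro r _
        simp only [Function.comp_apply]
        apply List.map_congr_left
        intro c hc
        have := hlen c hc
        cases c with
        | nil => simp at this
        | cons x xs => simp
    · constructor
      · rw [List.all_eq_true]
        intro c hc
        have := hlen c hc
        cases c with
        | nil => simp at this
        | cons x xs => simp
      · exact hne

theorem pattern2_main (nrows ncols : Int) : pattern2 nrows ncols = pattern2_alt nrows ncols := by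
  rw [pattern2_eq_map]
  unfold pattern2_alt
  by_cases h0 : nrows ≤ 0
  · rw [if_pos h0, PySem.List.pyRange_one_eq_nil (by omega)]
    simp
  rw [if_neg h0]
  by_cases h1 : ncols ≤ 0
  · rw [if_pos h1]
    rw [PySem.List.pyRange_one 1 (nrows + 1), PySem.List.pyRange_one 0 nrows]
    simp only [List.map_map, Int.add_sub_cancel, sub_zero]
    apply List.map_congr_left
    intro k hk
    have hk' : k < nrows.toNat := List.mem_range.mp hk
    simp only [Function.comp_apply]
    rw [rowA_eq nrows ncols (1 + (k : Int)) (by omega) (by omega)]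
    have hc0 : ncols.toNat = 0 := by omega
    simp [hc0]
  · rw [if_neg h1]
    have hcols_ne : (PySem.List.pyRange 0 ncols 1).map
        (fun c => PySem.List.pyRange (c * nrows + 1) ((c + 1) * nrows + 1) 1) ≠ [] := by
      rw [PySem.List.pyRange_one_cons (by omega)]
      simp
    have hlen : ∀ c ∈ (PySem.List.pyRange 0 ncols 1).map
        (fun c => PySem.List.pyRange (c * nrows + 1) ((c + 1) * nrows + 1) 1),
        c.length = nrows.toNat := by
      intro c hc
      obtain ⟨x, _, rfl⟩ := List.mem_map.mp hc
      rw [PySem.List.length_pyRange_one]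
      have hx : (x + 1) * nrows + 1 - (x * nrows + 1) = nrows := by ring
      rw [hx]
    rw [pyZipStar_eq nrows.toNat _ hcols_ne hlen]
    rw [PySem.List.pyRange_one 1 (nrows + 1)]
    simp only [List.map_map, Int.add_sub_cancel]
    apply List.map_congr_left
    intro k hk
    have hk' : k < nrows.toNat := List.mem_range.mp hk
    simp only [Function.comp_apply]
    rw [rowA_eq nrows ncols (1 + (k : Int)) (by omega) (by omega)]
    rw [PySem.List.pyRange_one 0 ncols]
    simp only [List.map_map, sub_zero]
    apply List.map_congr_left
    intro c hc
    simp only [Function.comp_apply, zero_add]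
    rw [List.getD_eq_getElem?_getD, PySem.List.getElem?_pyRange_one]
    have hb : ((c : Int) + 1) * nrows + 1 - ((c : Int) * nrows + 1) = nrows := by ring
    rw [hb, if_pos hk']
    simp
    ring

-- ===== VERDICT (by name: the statement is the Claim_ definition above) =====
theorem pattern2_spec : Claim_equal_pattern2 := by
  intro nrows ncols _
  unfold Spec_pattern2
  exact pattern2_main nrows ncols
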